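-- pv_equiv track=rewrite | github.com/FFKatahiraT/konkurs_triniti_2022 | ex2_prac.py | get_yLineIntensities_colorless_image
-- ===== SOURCE A (Python) =====
-- def get_yLineIntensities_colorless_image(imarray):
-- 	#The same as get_yLineIntensities, but works with
-- 	#colorless images (imarray depth = 2)
-- 	#
-- 	#Takes imarray with depth = 2 (colorless image)
-- 	#Returns list of vertical lines max intensities
-- 	#Each vertical line max intensity is one element
-- 	#of array YLinesIntensities
-- 	YLinesIntensities = []
-- 	for j in range(1, len(imarray[0])):#y
-- 		maxIntensity = imarray[0][j]
-- 		for i in range(len(imarray)):		#x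
-- 			if imarray[i][j] > maxIntensity:
-- 				maxIntensity = imarray[i][j]
-- 		YLinesIntensities.append(int(maxIntensity))
-- 	return YLinesIntensities
-- ===== SOURCE B (Python) =====
-- def get_yLineIntensities_colorless_image(imarray):
-- 	# Row-major single pass: keep a running list of per-column maxima
-- 	# seeded from row 0, rebuilt (updated) once per subsequent row.
-- 	maxima = list(imarray[0][1:])
-- 	for i in range(1, len(imarray)):
-- 		row = imarray[i]
-- 		maxima = [row[j + 1] if row[j + 1] > maxima[j] else maxima[j]
-- 				  for j in range(len(maxima))]
-- 	return [int(v) for v in maxima]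
-- ===== Notes on version B (the rewrite author's own statement) =====
-- stated objective: alternative
-- what changed: B replaces A's column-major nested scan (recomputing a scalar max per column) with one row-major pass that maintains a whole list of running per-column maxima seeded from row 0.
import Mathlib
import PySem

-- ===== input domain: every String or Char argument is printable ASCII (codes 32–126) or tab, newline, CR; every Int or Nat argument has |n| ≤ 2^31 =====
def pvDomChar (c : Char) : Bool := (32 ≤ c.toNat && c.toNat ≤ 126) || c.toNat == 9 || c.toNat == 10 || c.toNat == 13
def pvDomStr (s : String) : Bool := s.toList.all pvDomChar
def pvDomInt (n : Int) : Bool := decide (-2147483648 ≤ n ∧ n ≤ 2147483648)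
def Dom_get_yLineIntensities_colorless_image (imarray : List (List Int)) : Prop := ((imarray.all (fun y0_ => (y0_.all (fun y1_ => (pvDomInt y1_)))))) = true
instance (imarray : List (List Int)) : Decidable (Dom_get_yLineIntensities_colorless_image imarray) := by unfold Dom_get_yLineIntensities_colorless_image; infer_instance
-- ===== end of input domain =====

-- B computes the same per-column maxima in one row-major pass with a running maxima list
-- (alternative decomposition, same cost); A scans column-by-column with a scalar max.

-- ===== PORT A =====
-- column-major: for each column j in range(1, len(imarray[0])), scan all rows for the max
def get_yLineIntensities_colorless_image (imarray : List (List Int)) : List Int :=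
  let row0 := PySem.List.pyGetD imarray 0 []
  (PySem.List.pyRange 1 (PySem.List.len row0)).foldl
    (fun acc j =>
      let m := (PySem.List.pyRange 0 (PySem.List.len imarray)).foldl
        (fun m i =>
          let v := PySem.List.pyGetD (PySem.List.pyGetD imarray i []) j 0
          if v > m then v else m)
        (PySem.List.pyGetD row0 j 0)
      acc ++ [m]) []

-- ===== PORT B =====
-- row-major: maxima seeded from row 0's tail, rebuilt once per later row
def get_yLineIntensities_colorless_image_alt (imarray : List (List Int)) : List Int :=
  let maxima0 := PySem.List.slice (PySem.List.pyGetD imarray 0 []) (some 1) none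
  let maxima := (PySem.List.pyRange 1 (PySem.List.len imarray)).foldl
    (fun mx i =>
      let row := PySem.List.pyGetD imarray i []
      (List.range mx.length).map (fun (j : Nat) =>
        let v := PySem.List.pyGetD row ((j : Int) + 1) 0
        if v > mx.getD j 0 then v else mx.getD j 0))
    maxima0
  maxima.map (fun v => v)

-- ===== PRECONDITION & SPEC =====
-- Pre_ excludes exactly the inputs on which Python A raises IndexError: the empty array
-- (imarray[0]) and, when at least one column is scanned, rows shorter than row 0.
def Pre_get_yLineIntensities_colorless_image (imarray : List (List Int)) : Prop :=
  imarray ≠ [] ∧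
    (2 ≤ (imarray.headD []).length →
      ∀ row ∈ imarray, (imarray.headD []).length ≤ row.length)
instance (imarray : List (List Int)) : Decidable (Pre_get_yLineIntensities_colorless_image imarray) := by unfold Pre_get_yLineIntensities_colorless_image; infer_instance
def pvWitness_get_yLineIntensities_colorless_image : List (List Int) := [[1, 2, 3], [4, 0, 5]]

def Spec_get_yLineIntensities_colorless_image (imarray : List (List Int)) (out : List Int) : Prop := out = get_yLineIntensities_colorless_image_alt imarray
instance (imarray : List (List Int)) (out : List Int) : Decidable (Spec_get_yLineIntensities_colorless_image imarray out) := by unfold Spec_get_yLineIntensities_colorless_image; infer_instance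

-- ===== CLAIM (what is proved, stated in full; the proofs are below) =====
def Claim_equal_get_yLineIntensities_colorless_image : Prop := ∀ (imarray : List (List Int)), Dom_get_yLineIntensities_colorless_image imarray → Pre_get_yLineIntensities_colorless_image imarray → Spec_get_yLineIntensities_colorless_image imarray (get_yLineIntensities_colorless_image imarray)

-- ===== LEMMAS AND PROOFS =====

-- scalar column fold (A's inner loop over the remaining rows, at column index j)
def pvColFold (rows : List (List Int)) (j : Int) (m : Int) : Int :=
  rows.foldl (fun m row => if PySem.List.pyGetD row j 0 > m then PySem.List.pyGetD row j 0 else m) m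

-- B's row step and row fold over the remaining rows
def pvRowStep (mx : List Int) (row : List Int) : List Int :=
  (List.range mx.length).map (fun (j : Nat) =>
    if PySem.List.pyGetD row ((j : Int) + 1) 0 > mx.getD j 0
    then PySem.List.pyGetD row ((j : Int) + 1) 0 else mx.getD j 0)

lemma pv_map_getD_range (mx : List Int) :
    (List.range mx.length).map (fun j => mx.getD j 0) = mx := by
  induction mx with
  | nil => simp
  | cons a t ih =>
    simp only [List.length_cons, List.range_succ_eq_map, List.map_cons, List.map_map]
    simpa using ih

-- B's row fold computes, at each index j, A's scalar column fold at column j+1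
lemma pv_rowfold_eq (rows : List (List Int)) :
    ∀ mx : List Int,
      rows.foldl pvRowStep mx =
        (List.range mx.length).map (fun (j : Nat) => pvColFold rows ((j : Int) + 1) (mx.getD j 0)) := by
  induction rows with
  | nil => intro mx; simpa [pvColFold] using (pv_map_getD_range mx).symm
  | cons r t ih =>
    intro mx
    simp only [List.foldl_cons, ih (pvRowStep mx r)]
    have hlen : (pvRowStep mx r).length = mx.length := by simp [pvRowStep]
    rw [hlen]
    refine List.map_congr_left ?_
    intro j hj
    have hj' : j < mx.length := List.mem_range.mp hj
    have hget : (pvRowStep mx r).getD j 0 =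
        (if PySem.List.pyGetD r ((j : Int) + 1) 0 > mx.getD j 0
         then PySem.List.pyGetD r ((j : Int) + 1) 0 else mx.getD j 0) := by
      simp [pvRowStep, List.getD_eq_getElem?_getD, hj']
    rw [hget]
    simp only [pvColFold, List.foldl_cons]

-- pyRange 1 (n+1) enumerates the casts of 1..n
lemma pv_pyRange_one (n : Nat) :
    PySem.List.pyRange 1 ((n + 1 : Nat) : Int) =
      (List.range n).map (fun (k : Nat) => ((k : Int) + 1)) := by
  have h0 : (0 : Int) < ((n + 1 : Nat) : Int) := by positivity
  have h := PySem.List.pyRange_zero_natCast (n + 1)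
  rw [PySem.List.pyRange_one_cons h0] at h
  simp only [List.range_succ_eq_map, List.map_cons, List.map_map, List.cons.injEq] at h
  obtain ⟨-, h2⟩ := h
  rw [show (0 : Int) + 1 = 1 from rfl] at h2
  rw [h2]
  refine List.map_congr_left ?_
  intro k _
  simp [Function.comp, Nat.succ_eq_add_one]

-- ===== VERDICT (by name: the statement is the Claim_ definition above) =====
theorem get_yLineIntensities_colorless_image_spec : Claim_equal_get_yLineIntensities_colorless_image := by
  intro imarray _ hpre
  obtain ⟨hne, -⟩ := hpre
  obtain ⟨r0, rest, rfl⟩ : ∃ r0 rest, imarray = r0 :: rest :=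
    match imarray, hne with
    | x :: xs, _ => ⟨x, xs, rfl⟩
  unfold Spec_get_yLineIntensities_colorless_image
  have hrow0 : PySem.List.pyGetD (r0 :: rest) 0 [] = r0 := by
    simp [PySem.List.pyGetD, PySem.List.pyGet?, PySem.List.pyIdx?]
  -- A reduced to a map of scalar column folds over the column range
  have hA : get_yLineIntensities_colorless_image (r0 :: rest) =
      (PySem.List.pyRange 1 (PySem.List.len r0)).map
        (fun j => pvColFold rest j (PySem.List.pyGetD r0 j 0)) := by
    simp only [get_yLineIntensities_colorless_image, hrow0,
      PySem.List.foldl_append_singleton_eq_map, List.nil_append]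
    refine List.map_congr_left ?_
    intro j hj
    rw [PySem.List.foldl_pyRange_pyGetD (r0 :: rest) []
      (fun m row => if PySem.List.pyGetD row j 0 > m then PySem.List.pyGetD row j 0 else m)
      (PySem.List.pyGetD r0 j 0) le_rfl]
    simp [pvColFold]
  -- B reduced to the same map via the row-fold characterisation
  have hB : get_yLineIntensities_colorless_image_alt (r0 :: rest) =
      (List.range (r0.drop 1).length).map
        (fun (j : Nat) => pvColFold rest ((j : Int) + 1) ((r0.drop 1).getD j 0)) := by
    have hslice : PySem.List.slice r0 (some 1) none = r0.drop 1 := by simp [pysem]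
    simp only [get_yLineIntensities_colorless_image_alt, hrow0, hslice]
    have hbody : (fun (mx : List Int) (i : Int) =>
        (List.range mx.length).map (fun (j : Nat) =>
          if PySem.List.pyGetD (PySem.List.pyGetD (r0 :: rest) i []) ((j : Int) + 1) 0 > mx.getD j 0 then
            PySem.List.pyGetD (PySem.List.pyGetD (r0 :: rest) i []) ((j : Int) + 1) 0
          else mx.getD j 0)) =
        (fun mx i => pvRowStep mx (PySem.List.pyGetD (r0 :: rest) i [])) := by
      funext mx i; simp [pvRowStep]
    rw [hbody, PySem.List.foldl_pyRange_pyGetD (r0 :: rest) [] pvRowStep (r0.drop 1)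
      (by norm_num : (0 : Int) ≤ 1)]
    simp only [show ((1 : Int)).toNat = 1 from rfl, List.drop_succ_cons, List.drop_zero]
    rw [pv_rowfold_eq rest (r0.drop 1)]
    simp [pvColFold]
  rw [hA, hB]
  cases r0 with
  | nil => simp [PySem.List.len, PySem.List.pyRange]
  | cons a t =>
    have hlen : PySem.List.len (a :: t) = ((t.length + 1 : Nat) : Int) := by
      simp [PySem.List.len]
    rw [hlen, pv_pyRange_one, List.map_map, List.drop_succ_cons, List.drop_zero]
    refine List.map_congr_left ?_
    intro k _
    have hc : ((k : Int) + 1) = ((k + 1 : Nat) : Int) := by push_cast; ring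
    simp only [Function.comp, hc, PySem.List.pyGetD_natCast, List.getD_cons_succ]
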